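-- pv_equiv track=rewrite | github.com/drakeangus/advent_of_code | 2024/Day4/prob1.py | GetDiagRight
-- ===== SOURCE A (Python) =====
-- def GetDiagRight(word_search):
--     string=str()
--     max_y = len(word_search)
--     max_x = len(word_search[0])
--     for y in range(0,max_y + max_x):
--         x=0
--         while y >= 0:
--             try:
--                 string += word_search[y][x]
--             except:
--                 y-=1
--                 x+=1
--                 continue
--             y-=1
--             x+=1
--         string += "_"
--     return string
-- ===== SOURCE B (Python) =====
-- def GetDiagRight(word_search):
--     max_y = len(word_search)
--     max_x = len(word_search[0])
--     D = max_y + max_x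
--     diags = [[] for _ in range(D)]
--     for y in range(max_y - 1, -1, -1):
--         row = word_search[y]
--         for x, ch in enumerate(row[:D - y]):
--             diags[y + x].append(ch)
--     return "_".join("".join(cs) for cs in diags) + "_"
-- ===== Notes on version B (the rewrite author's own statement) =====
-- stated objective: faster
-- what changed: Replaced A's per-diagonal downward scan that probes every (y,x) pair with try/except (including all out-of-range cells) by a single row-major pass that buckets each character into its diagonal and joins the buckets once.
import Mathlib
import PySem

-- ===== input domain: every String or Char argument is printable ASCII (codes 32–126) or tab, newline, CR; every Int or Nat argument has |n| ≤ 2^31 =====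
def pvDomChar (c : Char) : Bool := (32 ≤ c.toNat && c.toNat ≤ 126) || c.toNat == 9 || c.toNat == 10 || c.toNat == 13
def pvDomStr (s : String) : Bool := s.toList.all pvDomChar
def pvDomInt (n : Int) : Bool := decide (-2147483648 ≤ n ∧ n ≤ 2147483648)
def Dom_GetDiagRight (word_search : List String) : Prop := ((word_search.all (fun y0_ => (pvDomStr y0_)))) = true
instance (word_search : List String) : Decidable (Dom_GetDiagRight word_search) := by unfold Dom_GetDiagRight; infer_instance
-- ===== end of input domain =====

-- B replaces A's per-diagonal scan with exception probing (Θ((N+M)²) index attempts) by a single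
-- row-major pass that buckets each cell into its diagonal, O(N·M).

-- ===== PORT A =====
-- inner 'while y >= 0' loop of A: y counts down, x up; the try/except appends word_search[y][x]
-- exactly when both indices are in range (PySem.List.pyGet? returns none where Python raises)
def pvAInner (rows : List (List Char)) : Nat → Nat → List Char → List Char
  | y, x, s =>
    let s' := match (PySem.List.pyGet? rows (y : Int)).bind
                     (fun r => PySem.List.pyGet? r (x : Int)) with
      | some c => s ++ [c]
      | none => s
    match y with
    | 0 => s'
    | Nat.succ y' => pvAInner rows y' (x + 1) s'

def GetDiagRight (word_search : List String) : String :=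
  let rows := word_search.map String.toList
  let max_y := rows.length
  let max_x := (PySem.List.pyGetD rows 0 []).length  -- word_search[0]; Pre_ excludes the empty list
  String.ofList
    ((List.range (max_y + max_x)).foldl (fun s d => pvAInner rows d 0 s ++ ['_']) [])

-- ===== PORT B =====
-- inner 'for x, ch in enumerate(row[:D - y])' loop: append ch to bucket y + x
def pvBAddRow (y : Nat) : Nat → List Char → List (List Char) → List (List Char)
  | _, [], dg => dg
  | x, c :: cs, dg => pvBAddRow y (x + 1) cs (dg.set (y + x) (dg.getD (y + x) [] ++ [c]))

def GetDiagRight_alt (word_search : List String) : String :=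
  let rows := word_search.map String.toList
  let max_y := rows.length
  let max_x := (PySem.List.pyGetD rows 0 []).length  -- word_search[0]; Pre_ excludes the empty list
  let D := max_y + max_x
  let diags := ((List.range max_y).reverse).foldl
      (fun dg y => pvBAddRow y 0 ((rows.getD y []).take (D - y)) dg)
      (List.replicate D [])
  String.ofList (PySem.Chars.join ['_'] diags ++ ['_'])

-- ===== PRECONDITION & SPEC =====
-- Pre_ excludes only the empty list, on which A raises IndexError at word_search[0]
def Pre_GetDiagRight (word_search : List String) : Prop := word_search ≠ []
instance (word_search : List String) : Decidable (Pre_GetDiagRight word_search) := by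
  unfold Pre_GetDiagRight; infer_instance

def pvWitness_GetDiagRight : List String := ["ab", "cd"]

def Spec_GetDiagRight (word_search : List String) (out : String) : Prop :=
  out = GetDiagRight_alt word_search
instance (word_search : List String) (out : String) : Decidable (Spec_GetDiagRight word_search out) := by
  unfold Spec_GetDiagRight; infer_instance

-- ===== CLAIM (what is proved, stated in full; the proofs are below) =====
def Claim_equal_GetDiagRight : Prop :=
  ∀ (word_search : List String), Dom_GetDiagRight word_search →
    Pre_GetDiagRight word_search →
    Spec_GetDiagRight word_search (GetDiagRight word_search)

-- ===== LEMMAS AND PROOFS =====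

-- the characters of diagonal d, highest row first (what A's inner loop emits for y₀ = d)
def pvDiag (rows : List (List Char)) (d : Nat) : List Char :=
  ((List.range (d + 1)).reverse).filterMap (fun y => rows[y]?.bind (fun r => r[d - y]?))

theorem pvAInner_eq (rows : List (List Char)) :
    ∀ (y x : Nat) (s : List Char),
      pvAInner rows y x s =
        s ++ ((List.range (y + 1)).reverse).filterMap
              (fun i => rows[i]?.bind (fun r => r[x + (y - i)]?)) := by
  intro y
  induction y with
  | zero =>
    intro x s
    show (match (PySem.List.pyGet? rows ((0 : Nat) : Int)).bind
               (fun r => PySem.List.pyGet? r (x : Int)) with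
         | some c => s ++ [c]
         | none => s) = _
    simp only [PySem.List.pyGet?_natCast]
    cases h : rows[0]?.bind (fun r => r[x]?) <;> simp [h, List.filterMap]
  | succ y' ih =>
    intro x s
    show pvAInner rows y' (x + 1)
        (match (PySem.List.pyGet? rows ((y' + 1 : Nat) : Int)).bind
               (fun r => PySem.List.pyGet? r (x : Int)) with
         | some c => s ++ [c]
         | none => s) = _
    simp only [PySem.List.pyGet?_natCast]
    rw [ih]
    rw [List.range_succ (n := y' + 1), List.reverse_append]
    simp only [List.reverse_cons, List.reverse_nil, List.nil_append, List.cons_append,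
      List.filterMap_cons]
    have hcongr : ∀ i ∈ (List.range (y' + 1)).reverse,
        rows[i]?.bind (fun r => r[(x + 1) + (y' - i)]?) =
        rows[i]?.bind (fun r => r[x + (y' + 1 - i)]?) := by
      intro i hi
      have : i < y' + 1 := by
        have := List.mem_reverse.mp hi
        exact List.mem_range.mp this
      have : (x + 1) + (y' - i) = x + (y' + 1 - i) := by omega
      rw [this]
    rw [List.filterMap_congr hcongr] at *
    cases h : rows[y' + 1]?.bind (fun r => r[x]?) with
    | none => simp [h]
    | some c => simp [h, List.append_assoc]

-- A's whole output, flattened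
theorem GetDiagRight_eq_flatMap (word_search : List String) :
    GetDiagRight word_search =
      String.ofList ((List.range (word_search.length +
          (PySem.List.pyGetD (word_search.map String.toList) 0 []).length)).flatMap
        (fun d => pvDiag (word_search.map String.toList) d ++ ['_'])) := by
  unfold GetDiagRight
  simp only [List.length_map]
  congr 1
  have h : ∀ (s : List Char) (d : Nat),
      pvAInner (word_search.map String.toList) d 0 s ++ ['_'] =
        s ++ (pvDiag (word_search.map String.toList) d ++ ['_']) := by
    intro s d
    rw [pvAInner_eq]
    simp [pvDiag, List.append_assoc]
  calc (List.range (word_search.length +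
          (PySem.List.pyGetD (word_search.map String.toList) 0 []).length)).foldl
        (fun s d => pvAInner (word_search.map String.toList) d 0 s ++ ['_']) []
      = (List.range (word_search.length +
          (PySem.List.pyGetD (word_search.map String.toList) 0 []).length)).foldl
        (fun s d => s ++ (pvDiag (word_search.map String.toList) d ++ ['_'])) [] := by
        exact PySem.List.foldl_congr_mem _ _ _ _ (fun acc x _ => h acc x)
    _ = _ := by
        rw [PySem.List.foldl_append_eq_flatMap]
        simp

-- B's inner row loop: effect on each bucket
theorem pvBAddRow_length (y : Nat) :
    ∀ (cs : List Char) (x : Nat) (dg : List (List Char)),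
      (pvBAddRow y x cs dg).length = dg.length := by
  intro cs
  induction cs with
  | nil => intro x dg; rfl
  | cons c cs ih => intro x dg; rw [pvBAddRow, ih]; simp

theorem pvBAddRow_getD (y : Nat) :
    ∀ (cs : List Char) (x : Nat) (dg : List (List Char)),
      y + x + cs.length ≤ dg.length →
      ∀ d, d < dg.length →
        (pvBAddRow y x cs dg).getD d [] =
          dg.getD d [] ++ (if y + x ≤ d then (cs[d - (y + x)]?).toList else []) := by
  intro cs
  induction cs with
  | nil =>
    intro x dg _ d _
    simp [pvBAddRow]
  | cons c cs ih =>
    intro x dg h d hd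
    rw [pvBAddRow]
    have hyx : y + x < dg.length := by simp only [List.length_cons] at h; omega
    have hih : y + (x + 1) + cs.length ≤ (dg.set (y + x) (dg.getD (y + x) [] ++ [c])).length := by
      simp only [List.length_set, List.length_cons] at *
      omega
    rw [ih (x + 1) _ hih d (by simpa using hd)]
    have hset : (dg.set (y + x) (dg.getD (y + x) [] ++ [c])).getD d [] =
        if y + x = d then dg.getD d [] ++ [c] else dg.getD d [] := by
      simp only [List.getD_eq_getElem?_getD, List.getElem?_set]
      split
      · next heq => subst heq; simp [hyx]
      · rfl
    rw [hset]
    by_cases hcase : y + x = d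
    · subst hcase
      simp
    · by_cases hle : y + x ≤ d
      · have h1 : y + (x + 1) ≤ d := by omega
        have h2 : d - (y + x) = (d - (y + (x + 1))) + 1 := by omega
        simp [if_neg hcase, if_pos hle, if_pos h1, h2]
      · have h1 : ¬ y + (x + 1) ≤ d := by omega
        simp [if_neg hcase, if_neg hle, if_neg h1]

-- B's outer loop over the rows (any list of row indices), parameterised by rows and D
theorem pvBFold_getD (rows : List (List Char)) (Dn : Nat) :
    ∀ (ys : List Nat) (dg : List (List Char)),
      (∀ y ∈ ys, y + ((rows.getD y []).take (Dn - y)).length ≤ dg.length) →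
      ((ys.foldl (fun dg y => pvBAddRow y 0 ((rows.getD y []).take (Dn - y)) dg) dg).length
          = dg.length) ∧
      ∀ d, d < dg.length →
        (ys.foldl (fun dg y => pvBAddRow y 0 ((rows.getD y []).take (Dn - y)) dg) dg).getD d []
          = dg.getD d [] ++ ys.flatMap (fun y =>
              if y ≤ d then (((rows.getD y []).take (Dn - y))[d - y]?).toList else []) := by
  intro ys
  induction ys with
  | nil => intro dg _; exact ⟨rfl, fun d _ => by simp⟩
  | cons y ys ih =>
    intro dg h
    have hy := h y (List.mem_cons_self)
    have hlen : (pvBAddRow y 0 ((rows.getD y []).take (Dn - y)) dg).length = dg.length :=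
      pvBAddRow_length y _ 0 dg
    have hrest : ∀ y' ∈ ys,
        y' + ((rows.getD y' []).take (Dn - y')).length ≤
          (pvBAddRow y 0 ((rows.getD y []).take (Dn - y)) dg).length := by
      intro y' hy'; rw [hlen]; exact h y' (List.mem_cons_of_mem _ hy')
    obtain ⟨ihlen, ihgetD⟩ := ih _ hrest
    constructor
    · simp only [List.foldl_cons]; rw [ihlen, hlen]
    · intro d hd
      simp only [List.foldl_cons]
      rw [ihgetD d (by rw [hlen]; exact hd)]
      rw [pvBAddRow_getD y _ 0 dg (by simpa using hy) d hd]
      simp only [Nat.add_zero, List.flatMap_cons, List.append_assoc]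

-- drop the part of a reversed range where f vanishes
theorem filterMap_reverse_range_drop {β : Type} (f : Nat → Option β) (K n : Nat)
    (hK : K ≤ n) (h : ∀ y, K ≤ y → y < n → f y = none) :
    ((List.range n).reverse).filterMap f = ((List.range K).reverse).filterMap f := by
  rw [show n = K + (n - K) by omega, List.range_add, List.reverse_append,
      List.filterMap_append]
  have : (((List.range (n - K)).map (fun x => K + x)).reverse).filterMap f = [] := by
    rw [List.filterMap_eq_nil_iff]
    intro a ha
    rw [List.mem_reverse, List.mem_map] at ha
    obtain ⟨x, hx, rfl⟩ := ha
    exact h _ (by omega) (by have := List.mem_range.mp hx; omega)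
  rw [this, List.nil_append]

-- the bucket that B builds for diagonal d equals A's diagonal
theorem bucket_eq_pvDiag (rows : List (List Char)) (M d : Nat)
    (hd : d < rows.length + M) :
    (List.range rows.length).reverse.flatMap (fun y =>
        if y ≤ d then (((rows.getD y []).take (rows.length + M - y))[d - y]?).toList else [])
      = pvDiag rows d := by
  have hflat : ∀ (l : List Nat) (g : Nat → Option Char),
      l.flatMap (fun y => (g y).toList) = l.filterMap g := by
    intro l g
    induction l with
    | nil => rfl
    | cons a l ih => cases h : g a <;> simp [List.flatMap_cons, h, ih]
  have hstep : (List.range rows.length).reverse.flatMap (fun y =>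
        if y ≤ d then (((rows.getD y []).take (rows.length + M - y))[d - y]?).toList else [])
      = (List.range rows.length).reverse.filterMap (fun y =>
        if y ≤ d then ((rows.getD y []).take (rows.length + M - y))[d - y]? else none) := by
    rw [← hflat]
    congr 1
    funext y
    split <;> simp
  rw [hstep]
  set K := min (d + 1) rows.length with hKdef
  have h1 : (List.range rows.length).reverse.filterMap (fun y =>
        if y ≤ d then ((rows.getD y []).take (rows.length + M - y))[d - y]? else none)
      = (List.range K).reverse.filterMap (fun y =>
        if y ≤ d then ((rows.getD y []).take (rows.length + M - y))[d - y]? else none) :=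
    filterMap_reverse_range_drop _ K rows.length (by omega)
      (fun y h1 _ => by rw [if_neg (by omega)])
  have h2 : ((List.range (d + 1)).reverse).filterMap
        (fun y => rows[y]?.bind (fun r => r[d - y]?))
      = (List.range K).reverse.filterMap
        (fun y => rows[y]?.bind (fun r => r[d - y]?)) :=
    filterMap_reverse_range_drop _ K (d + 1) (by omega)
      (fun y h1 _ => by
        have : rows[y]? = none := List.getElem?_eq_none (by omega)
        simp [this])
  rw [pvDiag, h1, h2]
  apply List.filterMap_congr
  intro y hy
  have hyK : y < K := List.mem_range.mp (List.mem_reverse.mp hy)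
  have hyd : y ≤ d := by omega
  have hyr : y < rows.length := by omega
  rw [if_pos hyd]
  have hget : rows[y]? = some rows[y] := List.getElem?_eq_getElem hyr
  have hgetD : rows.getD y [] = rows[y] := by
    simp [List.getD_eq_getElem?_getD, hget]
  rw [hget, hgetD, Option.bind_some]
  exact List.getElem?_take_of_lt (by omega)

-- '_'-join of a nonempty list followed by '_' is the flatMap with trailing separators
theorem join_append_sep (sep : List Char) :
    ∀ (l : List (List Char)), l ≠ [] →
      PySem.Chars.join sep l ++ sep = l.flatMap (fun p => p ++ sep) := by
  intro l
  induction l with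
  | nil => intro h; exact absurd rfl h
  | cons a l ih =>
    intro _
    cases l with
    | nil => simp [PySem.Chars.join_singleton]
    | cons b t =>
      rw [PySem.Chars.join_cons_cons, List.flatMap_cons, ← ih (by simp)]
      simp [List.append_assoc]

-- B's whole output, flattened
theorem GetDiagRight_alt_eq_flatMap (word_search : List String) (hne : word_search ≠ []) :
    GetDiagRight_alt word_search =
      String.ofList ((List.range (word_search.length +
          (PySem.List.pyGetD (word_search.map String.toList) 0 []).length)).flatMap
        (fun d => pvDiag (word_search.map String.toList) d ++ ['_'])) := by
  unfold GetDiagRight_alt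
  simp only [List.length_map]
  set rows := word_search.map String.toList with hrows
  set M := (PySem.List.pyGetD rows 0 []).length with hM
  have hN : rows.length = word_search.length := by simp [hrows]
  set Dn := word_search.length + M with hDn
  have hNle : rows.length ≤ Dn := by omega
  have hcond : ∀ y ∈ (List.range word_search.length).reverse,
      y + ((rows.getD y []).take (Dn - y)).length ≤ (List.replicate Dn ([] : List Char)).length := by
    intro y hy
    have hyr : y < word_search.length := List.mem_range.mp (List.mem_reverse.mp hy)
    have : ((rows.getD y []).take (Dn - y)).length ≤ Dn - y := by
      simp [List.length_take]
    simp only [List.length_replicate]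
    omega
  obtain ⟨hlen, hgetD⟩ := pvBFold_getD rows Dn (List.range word_search.length).reverse _ hcond
  set diags := ((List.range word_search.length).reverse).foldl
      (fun dg y => pvBAddRow y 0 ((rows.getD y []).take (Dn - y)) dg)
      (List.replicate Dn ([] : List Char)) with hdiags
  have hdlen : diags.length = Dn := by rw [hdiags, hlen, List.length_replicate]
  have hentry : ∀ d, d < Dn →
      diags.getD d [] = pvDiag rows d := by
    intro d hd
    rw [hdiags, hgetD d (by simpa using hd)]
    have : (List.replicate Dn ([] : List Char)).getD d [] = [] := by
      simp [List.getD_eq_getElem?_getD, hd]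
    rw [this, List.nil_append, ← hN]
    have hD' : Dn = rows.length + M := by omega
    rw [hD']
    exact bucket_eq_pvDiag rows M d (by omega)
  have hdiags_eq : diags = (List.range Dn).map (fun d => pvDiag rows d) := by
    apply List.ext_getElem
    · simp [hdlen]
    · intro d h1 h2
      have hd : d < Dn := by simpa [hdlen] using h1
      have := hentry d hd
      simp only [List.getD_eq_getElem?_getD, List.getElem?_eq_getElem h1] at this
      simp only [Option.getD_some] at this
      simp [this]
  rw [hdiags_eq]
  congr 1
  have hDpos : Dn ≠ 0 := by
    have : word_search.length ≠ 0 := fun h => hne (List.eq_nil_of_length_eq_zero h)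
    omega
  have hmapne : (List.range Dn).map (fun d => pvDiag rows d) ≠ [] := by
    simp [List.map_eq_nil_iff, List.range_eq_nil, hDpos]
  rw [join_append_sep ['_'] _ hmapne]
  simp [List.flatMap_map]

-- ===== VERDICT (by name: the statement is the Claim_ definition above) =====
theorem GetDiagRight_spec : Claim_equal_GetDiagRight := by
  intro word_search _ hpre
  unfold Spec_GetDiagRight
  rw [GetDiagRight_eq_flatMap, GetDiagRight_alt_eq_flatMap word_search hpre]
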